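-- pv_equiv track=rewrite | github.com/mmichalak-swe/Algo_Expert_Python | Min_Rewards/attempt_3.py | minRewards
-- ===== SOURCE A (Python) =====
-- def minRewards(scores):
--     rewards = [1 for score in scores]
--
--     for idx in range(1, len(scores)):
--         if scores[idx] > scores[idx - 1]:
--             rewards[idx] += rewards[idx - 1]
--
--     for idx in range(len(scores) - 2, -1, -1):
--         if scores[idx] > scores[idx + 1]:
--             rewards[idx] = max(rewards[idx], rewards[idx + 1] + 1)
--
--     return sum(rewards)
-- ===== SOURCE B (Python) =====
-- def minRewards(scores):
--     # Single-pass slope-counting ("candy") algorithm: maintain the current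
--     # ascending-run length `up`, descending-run length `down` and the length
--     # `peak` of the ascent into the last peak; accumulate the total directly,
--     # with no rewards array at all.
--     if not scores:
--         return 0
--     total = 1
--     up = down = peak = 0
--     prev = scores[0]
--     for s in scores[1:]:
--         if s > prev:
--             up += 1
--             down = 0
--             peak = up
--             total += up + 1
--         elif s < prev:
--             down += 1
--             up = 0
--             total += down + (1 if down > peak else 0)
--         else:
--             up = down = peak = 0
--             total += 1
--         prev = s
--     return total
-- ===== Notes on version B (the rewrite author's own statement) =====
-- stated objective: alternative
-- what changed: Replaces A's rewards array and its forward/backward index passes with the single-pass slope-counting ('candy') algorithm: one left-to-right walk maintaining ascending-run, descending-run and last-peak lengths and accumulating the total incrementally, with no per-element array at all.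
import Mathlib
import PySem

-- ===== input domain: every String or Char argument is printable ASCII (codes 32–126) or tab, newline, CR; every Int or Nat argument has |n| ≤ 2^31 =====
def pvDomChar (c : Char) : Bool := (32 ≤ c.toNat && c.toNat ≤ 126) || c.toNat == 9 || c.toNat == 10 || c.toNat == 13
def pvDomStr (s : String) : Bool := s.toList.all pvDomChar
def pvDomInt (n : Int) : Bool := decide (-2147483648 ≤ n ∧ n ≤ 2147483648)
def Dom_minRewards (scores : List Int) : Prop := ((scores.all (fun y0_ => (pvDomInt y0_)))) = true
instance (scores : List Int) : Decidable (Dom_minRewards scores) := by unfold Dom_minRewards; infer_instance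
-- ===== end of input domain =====

-- B replaces A's rewards array (forward/backward index passes) with the single-pass
-- slope-counting ("candy") algorithm carrying up/down/peak run counters (objective: alternative).

-- ===== PORT A =====
def minRewards (scores : List Int) : Int :=
  let rewards : List Int := scores.map (fun _ => (1 : Int))
  let rewards := (PySem.List.pyRange 1 (scores.length : Int) 1).foldl
    (fun r idx =>
      if PySem.List.pyGetD scores idx 0 > PySem.List.pyGetD scores (idx - 1) 0 then
        PySem.List.pySetD r idx (PySem.List.pyGetD r idx 0 + PySem.List.pyGetD r (idx - 1) 0)
      else r) rewards
  let rewards := (PySem.List.pyRange ((scores.length : Int) - 2) (-1) (-1)).foldl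
    (fun r idx =>
      if PySem.List.pyGetD scores idx 0 > PySem.List.pyGetD scores (idx + 1) 0 then
        PySem.List.pySetD r idx (max (PySem.List.pyGetD r idx 0) (PySem.List.pyGetD r (idx + 1) 0 + 1))
      else r) rewards
  rewards.sum

-- ===== PORT B =====
-- loop body of Source B: state (prev, up, down, peak, total)
def candyStep (st : Int × Int × Int × Int × Int) (s : Int) : Int × Int × Int × Int × Int :=
  if s > st.1 then
    (s, st.2.1 + 1, 0, st.2.1 + 1, st.2.2.2.2 + (st.2.1 + 1) + 1)
  else if s < st.1 then
    (s, 0, st.2.2.1 + 1, st.2.2.2.1,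
      st.2.2.2.2 + (st.2.2.1 + 1) + (if st.2.2.1 + 1 > st.2.2.2.1 then 1 else 0))
  else
    (s, 0, 0, 0, st.2.2.2.2 + 1)

def minRewards_alt (scores : List Int) : Int :=
  match scores with
  | [] => 0
  | x :: t => (t.foldl candyStep (x, 0, 0, 0, 1)).2.2.2.2

-- ===== PRECONDITION & SPEC =====
def Spec_minRewards (scores : List Int) (out : Int) : Prop := out = minRewards_alt scores
instance (scores : List Int) (out : Int) : Decidable (Spec_minRewards scores out) := by unfold Spec_minRewards; infer_instance

-- ===== CLAIM (what is proved, stated in full; the proofs are below) =====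
def Claim_equal_minRewards : Prop := ∀ (scores : List Int), Dom_minRewards scores → Spec_minRewards scores (minRewards scores)

-- ===== LEMMAS AND PROOFS =====

-- ascending run lengths: incFrom p v t = run lengths over t continuing a run that last saw
-- value p with current run length v; incL s = the run-length list of s.
def incAt (p v y : Int) : Int := if y > p then v + 1 else 1

def incFrom : Int → Int → List Int → List Int
  | _, _, [] => []
  | p, v, y :: t => incAt p v y :: incFrom y (incAt p v y) t

def incL : List Int → List Int
  | [] => []
  | x :: t => 1 :: incFrom x 1 t

def decL (s : List Int) : List Int := (incL s.reverse).reverse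

def mList (s : List Int) : List Int := ((incL s).zip (decL s)).map (fun ab => max ab.1 ab.2)

theorem length_incFrom (t : List Int) : ∀ p v, (incFrom p v t).length = t.length := by
  induction t with
  | nil => intro p v; rfl
  | cons y t ih => intro p v; simp [incFrom, ih]

theorem length_incL (s : List Int) : (incL s).length = s.length := by
  cases s with
  | nil => rfl
  | cons x t => simp [incL, length_incFrom]

theorem length_decL (s : List Int) : (decL s).length = s.length := by
  simp [decL, length_incL]

theorem length_mList (s : List Int) : (mList s).length = s.length := by
  simp [mList, length_incL, length_decL]

theorem getD_reverse (l : List Int) (i : Nat) (h : i < l.length) :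
    l.reverse.getD i 0 = l.getD (l.length - 1 - i) 0 := by
  rw [List.getD_eq_getElem _ _ (by simpa using h), List.getD_eq_getElem _ _ (by omega)]
  exact List.getElem_reverse _

theorem getD_take_lt (l : List Int) (j i : Nat) (h : i < j) (h2 : i < l.length) :
    (l.take j).getD i 0 = l.getD i 0 := by
  rw [List.getD_eq_getElem _ _ (by simp; omega), List.getD_eq_getElem _ _ h2]
  exact List.getElem_take

theorem take_succ_getD (l : List Int) (k : Nat) (h : k < l.length) :
    l.take (k + 1) = l.take k ++ [l.getD k 0] := by
  rw [List.getD_eq_getElem _ _ h, List.take_add_one, List.getElem?_eq_getElem h]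
  rfl

theorem drop_getD_cons (l : List Int) (k : Nat) (h : k < l.length) :
    l.drop k = l.getD k 0 :: l.drop (k + 1) := by
  rw [List.getD_eq_getElem _ _ h]
  exact List.drop_eq_getElem_cons h

theorem incFrom_pos (t : List Int) : ∀ p v, 0 ≤ v → ∀ x ∈ incFrom p v t, 1 ≤ x := by
  induction t with
  | nil => intro p v _ x hx; simp [incFrom] at hx
  | cons y t ih =>
    intro p v hv x hx
    simp only [incFrom, List.mem_cons] at hx
    rcases hx with h | h
    · subst h; unfold incAt; split <;> omega
    · exact ih y (incAt p v y) (by unfold incAt; split <;> omega) x h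

theorem incL_pos (s : List Int) : ∀ x ∈ incL s, 1 ≤ x := by
  cases s with
  | nil => intro x hx; simp [incL] at hx
  | cons a t =>
    intro x hx
    simp only [incL, List.mem_cons] at hx
    rcases hx with h | h
    · omega
    · exact incFrom_pos t a 1 (by omega) x h

theorem incL_getD_pos (s : List Int) (i : Nat) (h : i < s.length) : 1 ≤ (incL s).getD i 0 := by
  have hl : i < (incL s).length := by rw [length_incL]; exact h
  rw [List.getD_eq_getElem _ _ hl]
  exact incL_pos s _ (List.getElem_mem hl)

theorem incL_zero (s : List Int) (h : s ≠ []) : (incL s).getD 0 0 = 1 := by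
  cases s with
  | nil => exact absurd rfl h
  | cons a t => rfl

theorem incFrom_adj (t : List Int) : ∀ p v i, i + 1 < t.length →
    (incFrom p v t).getD (i + 1) 0 =
      if t.getD (i + 1) 0 > t.getD i 0 then (incFrom p v t).getD i 0 + 1 else 1 := by
  induction t with
  | nil => intro p v i h; simp at h
  | cons y t ih =>
    intro p v i h
    cases i with
    | zero =>
      cases t with
      | nil => simp at h
      | cons z t' => simp [incFrom, incAt]
    | succ i =>
      have h' : i + 1 < t.length := by simpa using h
      simpa [incFrom] using ih y (incAt p v y) i h'

theorem incL_adj (s : List Int) (i : Nat) (h : i + 1 < s.length) :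
    (incL s).getD (i + 1) 0 =
      if s.getD (i + 1) 0 > s.getD i 0 then (incL s).getD i 0 + 1 else 1 := by
  cases s with
  | nil => simp at h
  | cons x t =>
    cases i with
    | zero =>
      cases t with
      | nil => simp at h
      | cons y t' => simp [incL, incFrom, incAt]
    | succ i =>
      have h' : i + 1 < t.length := by simpa using h
      simpa [incL] using incFrom_adj t x 1 i h'

theorem decL_getD (s : List Int) (i : Nat) (h : i < s.length) :
    (decL s).getD i 0 = (incL s.reverse).getD (s.length - 1 - i) 0 := by
  have := getD_reverse (incL s.reverse) i (by simp [length_incL]; omega)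
  simpa [decL, length_incL] using this

theorem decL_last (s : List Int) (h : s ≠ []) : (decL s).getD (s.length - 1) 0 = 1 := by
  have hn : 0 < s.length := List.length_pos_iff.mpr h
  rw [decL_getD s (s.length - 1) (by omega),
      show s.length - 1 - (s.length - 1) = 0 from by omega]
  exact incL_zero s.reverse (by simpa using h)

theorem decL_getD_pos (s : List Int) (i : Nat) (h : i < s.length) : 1 ≤ (decL s).getD i 0 := by
  rw [decL_getD s i h]
  exact incL_getD_pos s.reverse (s.length - 1 - i) (by simp; omega)

theorem decL_succ (s : List Int) (i : Nat) (h : i + 1 < s.length) :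
    (decL s).getD i 0 =
      if s.getD i 0 > s.getD (i + 1) 0 then (decL s).getD (i + 1) 0 + 1 else 1 := by
  rw [decL_getD s i (by omega), decL_getD s (i + 1) h]
  rw [show s.length - 1 - i = (s.length - 2 - i) + 1 from by omega]
  rw [incL_adj s.reverse (s.length - 2 - i) (by simp; omega)]
  rw [show (s.length - 2 - i) + 1 = s.length - 1 - i from by omega]
  rw [getD_reverse s (s.length - 1 - i) (by omega), getD_reverse s (s.length - 2 - i) (by omega)]
  rw [show s.length - 1 - (s.length - 1 - i) = i from by omega,
      show s.length - 1 - (s.length - 2 - i) = i + 1 from by omega,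
      show s.length - 2 - i = s.length - 1 - (i + 1) from by omega]

theorem mList_getD (s : List Int) (i : Nat) (h : i < s.length) :
    (mList s).getD i 0 = max ((incL s).getD i 0) ((decL s).getD i 0) := by
  have h1 : i < (incL s).length := by rw [length_incL]; exact h
  have h2 : i < (decL s).length := by rw [length_decL]; exact h
  rw [List.getD_eq_getElem _ _ (by rw [length_mList]; exact h),
      List.getD_eq_getElem _ _ h1, List.getD_eq_getElem _ _ h2]
  simp [mList]

-- characterization of A's first loop
theorem loop1 (s : List Int) (k : Nat) (h1 : 1 ≤ k) (h2 : k ≤ s.length) :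
    (PySem.List.pyRange 1 (k : Int) 1).foldl
      (fun r idx =>
        if PySem.List.pyGetD s idx 0 > PySem.List.pyGetD s (idx - 1) 0 then
          PySem.List.pySetD r idx (PySem.List.pyGetD r idx 0 + PySem.List.pyGetD r (idx - 1) 0)
        else r) (s.map (fun _ => (1 : Int)))
    = (incL s).take k ++ List.replicate (s.length - k) 1 := by
  induction k, h1 using Nat.le_induction with
  | base =>
    rw [show ((1 : Nat) : Int) = 1 from by norm_num, PySem.List.pyRange_one_eq_nil (by norm_num)]
    cases s with
    | nil => simp at h2
    | cons x t =>
      simp [incL, List.map_const']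
  | succ k hk ih =>
    have hkn : k < s.length := by omega
    have hL : (incL s).length = s.length := length_incL s
    rw [show ((k + 1 : Nat) : Int) = (k : Int) + 1 from by push_cast; ring,
        PySem.List.pyRange_one_succ_right (by exact_mod_cast hk), List.foldl_append,
        ih (by omega)]
    simp only [List.foldl_cons, List.foldl_nil]
    rw [show (k : Int) - 1 = ((k - 1 : Nat) : Int) from by omega]
    rw [PySem.List.pySetD_natCast]
    simp only [PySem.List.pyGetD_natCast]
    have htk : ((incL s).take k).length = k := by rw [List.length_take]; omega
    have hrep : List.replicate (s.length - k) (1 : Int) = 1 :: List.replicate (s.length - (k + 1)) 1 := by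
      rw [show s.length - k = (s.length - (k + 1)) + 1 from by omega, List.replicate_succ]
    have hSk : ((incL s).take k ++ List.replicate (s.length - k) 1).getD k 0 = 1 := by
      rw [List.getD_append_right _ _ _ _ (by omega), hrep, htk, Nat.sub_self]
      rfl
    have hSk1 : ((incL s).take k ++ List.replicate (s.length - k) 1).getD (k - 1) 0
        = (incL s).getD (k - 1) 0 := by
      rw [List.getD_append _ _ _ _ (by omega), getD_take_lt _ _ _ (by omega) (by omega)]
    have htake : (incL s).take (k + 1) = (incL s).take k ++ [(incL s).getD k 0] :=
      take_succ_getD _ _ (by omega)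
    have hLk : (incL s).getD k 0 =
        if s.getD k 0 > s.getD (k - 1) 0 then (incL s).getD (k - 1) 0 + 1 else 1 := by
      have := incL_adj s (k - 1) (by omega)
      rwa [show k - 1 + 1 = k from by omega] at this
    have hset : ∀ v : Int,
        ((incL s).take k ++ List.replicate (s.length - k) 1).set k v
          = (incL s).take k ++ v :: List.replicate (s.length - (k + 1)) 1 := by
      intro v
      rw [hrep, List.set_append, if_neg (by omega), htk, Nat.sub_self]
      rfl
    rw [hSk, hSk1, hset, htake, hLk, hrep]
    split_ifs with hc
    · simp [Int.add_comm]
    · simp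

-- peel the last-processed index of a countdown range
theorem pyRange_neg_one_snoc (a b : Int) (h : b < a) :
    PySem.List.pyRange a b (-1) = PySem.List.pyRange a (b + 1) (-1) ++ [b + 1] := by
  rw [PySem.List.pyRange_neg_one_eq_reverse, PySem.List.pyRange_neg_one_eq_reverse,
      PySem.List.pyRange_one_cons (by omega : b + 1 < a + 1)]
  simp

-- characterization of A's second loop, phrased by the number d of still-unprocessed indices
theorem loop2' (s : List Int) (hn : 1 ≤ s.length) : ∀ d : Nat, d ≤ s.length - 1 →
    (PySem.List.pyRange ((s.length : Int) - 2) (((s.length - 1 - d : Nat) : Int) - 1) (-1)).foldl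
      (fun r idx =>
        if PySem.List.pyGetD s idx 0 > PySem.List.pyGetD s (idx + 1) 0 then
          PySem.List.pySetD r idx (max (PySem.List.pyGetD r idx 0) (PySem.List.pyGetD r (idx + 1) 0 + 1))
        else r) (incL s)
    = (incL s).take (s.length - 1 - d) ++ (mList s).drop (s.length - 1 - d) := by
  intro d
  induction d with
  | zero =>
    intro _
    have hL : (incL s).length = s.length := length_incL s
    have hM : (mList s).length = s.length := length_mList s
    rw [show (((s.length - 1 - 0 : Nat) : Int) - 1) = (s.length : Int) - 2 from by omega,
        PySem.List.pyRange_neg_one_eq_nil (le_refl _)]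
    simp only [List.foldl_nil, Nat.sub_zero]
    conv_lhs => rw [← List.take_append_drop (s.length - 1) (incL s)]
    congr 1
    rw [drop_getD_cons (incL s) (s.length - 1) (by omega),
        drop_getD_cons (mList s) (s.length - 1) (by omega),
        List.drop_eq_nil_of_le (by omega), List.drop_eq_nil_of_le (by omega),
        mList_getD s (s.length - 1) (by omega), decL_last s (by intro hnil; simp [hnil] at hn),
        max_eq_left (incL_getD_pos s (s.length - 1) (by omega))]
  | succ d ih =>
    intro hd
    have hn2 : 2 ≤ s.length := by omega
    have hL : (incL s).length = s.length := length_incL s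
    have hM : (mList s).length = s.length := length_mList s
    have hkk : s.length - 1 - (d + 1) = s.length - 2 - d := by omega
    rw [pyRange_neg_one_snoc _ _ (by omega),
        show (((s.length - 1 - (d + 1) : Nat) : Int) - 1) + 1 = ((s.length - 2 - d : Nat) : Int) from by omega]
    have ihh := ih (by omega)
    rw [show (((s.length - 1 - d : Nat) : Int) - 1) = ((s.length - 2 - d : Nat) : Int) from by omega] at ihh
    rw [List.foldl_append, ihh]
    simp only [List.foldl_cons, List.foldl_nil]
    rw [show ((s.length - 2 - d : Nat) : Int) + 1 = ((s.length - 1 - d : Nat) : Int) from by omega]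
    rw [PySem.List.pySetD_natCast]
    simp only [PySem.List.pyGetD_natCast]
    rw [hkk]
    rw [show s.length - 1 - d = (s.length - 2 - d) + 1 from by omega]
    generalize hkdef : s.length - 2 - d = k at *
    have hk1 : k + 1 < s.length := by omega
    have htake : (incL s).take (k + 1) = (incL s).take k ++ [(incL s).getD k 0] :=
      take_succ_getD _ _ (by omega)
    have hdropM : (mList s).drop k = (mList s).getD k 0 :: (mList s).drop (k + 1) :=
      drop_getD_cons _ _ (by omega)
    have hSk : ((incL s).take (k + 1) ++ (mList s).drop (k + 1)).getD k 0 = (incL s).getD k 0 := by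
      rw [List.getD_append _ _ _ _ (by rw [List.length_take]; omega),
          getD_take_lt _ _ _ (by omega) (by omega)]
    have hSk1 : ((incL s).take (k + 1) ++ (mList s).drop (k + 1)).getD (k + 1) 0
        = (mList s).getD (k + 1) 0 := by
      rw [List.getD_append_right _ _ _ _ (by rw [List.length_take]; omega),
          List.length_take, min_eq_left (by omega), Nat.sub_self,
          drop_getD_cons (mList s) (k + 1) (by omega)]
      rfl
    have hset : ∀ v : Int,
        ((incL s).take (k + 1) ++ (mList s).drop (k + 1)).set k v
          = (incL s).take k ++ v :: (mList s).drop (k + 1) := by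
      intro v
      rw [htake, List.append_assoc, List.set_append,
          if_neg (by rw [List.length_take]; omega), List.length_take, min_eq_left (by omega),
          Nat.sub_self]
      rfl
    have hMk : (mList s).getD k 0 = max ((incL s).getD k 0) ((decL s).getD k 0) :=
      mList_getD s k (by omega)
    have hMk1 : (mList s).getD (k + 1) 0 = max ((incL s).getD (k + 1) 0) ((decL s).getD (k + 1) 0) :=
      mList_getD s (k + 1) (by omega)
    have hdecpos : 1 ≤ (decL s).getD (k + 1) 0 := decL_getD_pos s (k + 1) (by omega)
    have hincpos : 1 ≤ (incL s).getD k 0 := incL_getD_pos s k (by omega)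
    have hadj : (incL s).getD (k + 1) 0 =
        if s.getD (k + 1) 0 > s.getD k 0 then (incL s).getD k 0 + 1 else 1 :=
      incL_adj s k hk1
    have hdec : (decL s).getD k 0 =
        if s.getD k 0 > s.getD (k + 1) 0 then (decL s).getD (k + 1) 0 + 1 else 1 :=
      decL_succ s k hk1
    rw [hSk, hSk1]
    split_ifs with hc
    · rw [hset, hdropM, hMk]
      congr 2
      rw [if_neg (by omega)] at hadj
      rw [if_pos hc] at hdec
      rw [hMk1, hadj, hdec, max_eq_right hdecpos]
    · rw [htake, List.append_assoc, hdropM, hMk]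
      rw [if_neg hc] at hdec
      rw [hdec, max_eq_left hincpos]
      rfl

theorem minRewards_eq_sum_mList (s : List Int) : minRewards s = (mList s).sum := by
  cases s with
  | nil => rfl
  | cons x t =>
    have hn : 1 ≤ (x :: t).length := by simp
    simp only [minRewards]
    rw [loop1 (x :: t) (x :: t).length hn (le_refl _), Nat.sub_self, List.replicate_zero,
        List.append_nil, ← length_incL (x :: t), List.take_length, length_incL]
    have h2 := loop2' (x :: t) hn ((x :: t).length - 1) (le_refl _)
    rw [show (x :: t).length - 1 - ((x :: t).length - 1) = 0 from by omega] at h2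
    rw [show ((0 : Nat) : Int) - 1 = (-1 : Int) from by norm_num] at h2
    rw [h2]
    simp

-- ===== B-side: the candy invariant =====

-- run counters read off the REVERSED list: dcnt = trailing strict-ascent length of s
-- (descents along s.reverse), acnt = trailing strict-descent length of s.
def dcnt : Int → List Int → Int
  | _, [] => 0
  | v, a :: t => if a < v then dcnt a t + 1 else 0

def acnt : Int → List Int → Nat
  | _, [] => 0
  | v, a :: t => if v < a then acnt a t + 1 else 0

def upF : List Int → Int
  | [] => 0
  | p :: r' => dcnt p r'

def downF : List Int → Nat
  | [] => 0
  | p :: r' => acnt p r'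

-- reversed inc list, the "peak" inc value, and the total
def uL (s : List Int) : List Int := (incL s).reverse
def pkF (s : List Int) : Int := (uL s).getD (downF s.reverse) 0
def SF (s : List Int) : Int := (List.zipWith max (uL s) (incL s.reverse)).sum

def stInv (s : List Int) : Int × Int × Int × Int × Int :=
  (s.getLastD 0, upF s.reverse, (downF s.reverse : Int), pkF s - 1, SF s)

theorem dcnt_nonneg (t : List Int) : ∀ v, 0 ≤ dcnt v t := by
  induction t with
  | nil => intro v; simp [dcnt]
  | cons a t ih =>
    intro v
    simp only [dcnt]
    split
    · have := ih a; omega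
    · omega

theorem acnt_le_length (t : List Int) : ∀ v, acnt v t ≤ t.length := by
  induction t with
  | nil => intro v; simp [acnt]
  | cons a t ih =>
    intro v
    simp only [acnt]
    split
    · have := ih a; simp; omega
    · simp

theorem incFrom_snoc (t : List Int) : ∀ p v y,
    incFrom p v (t ++ [y]) =
      incFrom p v t ++ [incAt ((p :: t).getLastD 0) ((incFrom p v t).getLastD v) y] := by
  induction t with
  | nil => intro p v y; simp [incFrom]
  | cons a t ih =>
    intro p v y
    simp only [List.cons_append, incFrom, ih a (incAt p v a) y, List.getLastD_cons]

theorem incL_snoc (x : Int) (t : List Int) (y : Int) :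
    incL ((x :: t) ++ [y]) =
      incL (x :: t) ++ [incAt ((x :: t).getLastD 0) ((incL (x :: t)).getLastD 0) y] := by
  simp only [List.cons_append, incL, incFrom_snoc t x 1 y, List.getLastD_cons]

theorem rev_head_getLastD (x p : Int) (t r' : List Int) (hr : (x :: t).reverse = p :: r') :
    p = (x :: t).getLastD 0 := by
  have h1 : (x :: t).reverse.head? = some p := by rw [hr]; rfl
  rw [List.head?_reverse] at h1
  rw [List.getLastD_eq_getLast?, h1]
  rfl

-- trailing inc value = trailing ascent count + 1
theorem incL_getLastD (t : List Int) (x : Int) :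
    (incL (x :: t)).getLastD 0 = upF ((x :: t).reverse) + 1 := by
  induction t using List.reverseRecOn with
  | nil => simp [incL, incFrom, upF, dcnt]
  | append_singleton t' y ih =>
    rw [show x :: (t' ++ [y]) = (x :: t') ++ [y] from rfl, incL_snoc x t' y]
    have hrev : ((x :: t') ++ [y]).reverse = y :: (x :: t').reverse := by
      simp
    rw [hrev]
    obtain ⟨p, r', hr⟩ : ∃ p r', (x :: t').reverse = p :: r' := by
      cases hc : (x :: t').reverse with
      | nil => simp at hc
      | cons p r' => exact ⟨p, r', rfl⟩
    have hp : p = (x :: t').getLastD 0 := rev_head_getLastD x p t' r' hr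
    rw [hr] at ih ⊢
    rw [List.getLastD_concat, ih, ← hp]
    simp only [upF, dcnt, incAt]
    split_ifs <;> omega

-- inside the trailing descending run every inc value is 1
theorem uL_run_ones (t : List Int) (x : Int) :
    ∀ j, j < downF ((x :: t).reverse) → (uL (x :: t)).getD j 0 = 1 := by
  induction t using List.reverseRecOn with
  | nil => intro j hj; simp [downF, acnt] at hj
  | append_singleton t' y ih =>
    intro j hj
    rw [show x :: (t' ++ [y]) = (x :: t') ++ [y] from rfl] at hj ⊢
    have hrev : ((x :: t') ++ [y]).reverse = y :: (x :: t').reverse := by simp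
    obtain ⟨p, r', hr⟩ : ∃ p r', (x :: t').reverse = p :: r' := by
      cases hc : (x :: t').reverse with
      | nil => simp at hc
      | cons p r' => exact ⟨p, r', rfl⟩
    have hp : p = (x :: t').getLastD 0 := rev_head_getLastD x p t' r' hr
    rw [hrev, hr] at hj
    simp only [downF, acnt] at hj
    have huL : uL ((x :: t') ++ [y])
        = incAt ((x :: t').getLastD 0) ((incL (x :: t')).getLastD 0) y :: uL (x :: t') := by
      simp only [uL, incL_snoc x t' y]
      simp
    rw [huL]
    by_cases hd : y < p
    · rw [if_pos hd] at hj
      cases j with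
      | zero =>
        simp only [List.getD_cons_zero]
        rw [incL_getLastD t' x]
        simp only [incAt, ← hp]
        rw [if_neg (by omega)]
      | succ j =>
        simp only [List.getD_cons_succ]
        apply ih
        rw [hr]
        simp only [downF]
        omega
    · rw [if_neg hd] at hj; omega

-- seed-bump lemma: raising the incoming run value by one adds 1 to each position of the
-- initial ascending run and bumps the position just after it iff it exceeds that entry
theorem delta_sum (l : List Int) : ∀ (p v : Int) (c : List Int), 1 ≤ v →
    acnt p l < c.length → c.length = l.length + 1 →
    (∀ j, j < acnt p l → c.getD j 0 = 1) →
    (List.zipWith max c ((v + 1) :: incFrom p (v + 1) l)).sum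
      = (List.zipWith max c (v :: incFrom p v l)).sum + acnt p l
        + (if v + 1 + acnt p l > c.getD (acnt p l) 0 then 1 else 0) := by
  induction l with
  | nil =>
    intro p v c hv _ hlen _
    match c, hlen with
    | [c0], _ =>
      simp only [incFrom, acnt, List.zipWith_cons_cons, List.zipWith_nil_right,
        List.sum_cons, List.sum_nil, List.getD_cons_zero]
      push_cast
      split_ifs with h <;> omega
  | cons a t ih =>
    intro p v c hv hklt hlen hones
    match c with
    | c0 :: c' =>
      by_cases ha : p < a
      · have hk : acnt p (a :: t) = acnt a t + 1 := by simp [acnt, ha]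
        have hc0 : c0 = 1 := by
          have := hones 0 (by omega)
          simpa using this
        have hstep : incAt p (v + 1) a = v + 1 + 1 := by simp [incAt, ha]
        have hstep' : incAt p v a = v + 1 := by simp [incAt, ha]
        simp only [incFrom, hstep, hstep', List.zipWith_cons_cons, List.sum_cons, hk]
        have ihh := ih a (v + 1) c' (by omega)
          (by simp at hlen hklt; omega) (by simp at hlen; omega)
          (by intro j hj; have := hones (j + 1) (by omega); simpa using this)
        rw [ihh, hc0]
        simp only [List.getD_cons_succ]
        have h1 : max (1 : Int) (v + 1) = v + 1 := by omega
        have h2 : max (1 : Int) v = v := by omega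
        rw [h1, h2]
        push_cast
        split_ifs <;> omega
      · have hk : acnt p (a :: t) = 0 := by simp [acnt]; omega
        have hstep : incAt p (v + 1) a = 1 := by simp [incAt]; omega
        have hstep' : incAt p v a = 1 := by simp [incAt]; omega
        simp only [incFrom, hstep, hstep', List.zipWith_cons_cons, List.sum_cons, hk]
        simp only [List.getD_cons_zero, Nat.cast_zero]
        split_ifs with h <;> omega

-- one step of the fold preserves the invariant
theorem candyStep_stInv (s0 : List Int) (hne : s0 ≠ []) (y : Int) :
    candyStep (stInv s0) y = stInv (s0 ++ [y]) := by
  match s0, hne with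
  | x :: t, _ =>
    obtain ⟨p, r', hr⟩ : ∃ p r', (x :: t).reverse = p :: r' := by
      cases hc : (x :: t).reverse with
      | nil => simp at hc
      | cons p r' => exact ⟨p, r', rfl⟩
    have hp : p = (x :: t).getLastD 0 := rev_head_getLastD x p t r' hr
    have hrevs : ((x :: t) ++ [y]).reverse = y :: p :: r' := by
      rw [List.reverse_append]
      simp [hr]
    have hlast : ((x :: t) ++ [y]).getLastD 0 = y := List.getLastD_concat
    have hlens : (uL (x :: t)).length = (x :: t).length := by
      simp [uL, length_incL]
    have hlenr : r'.length + 1 = (x :: t).length := by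
      have : ((x :: t).reverse).length = (x :: t).length := by simp
      rw [hr] at this
      simpa using this
    -- the appended inc value
    have hinc : incL ((x :: t) ++ [y])
        = incL (x :: t) ++ [incAt p (upF ((x :: t).reverse) + 1) y] := by
      rw [incL_snoc, incL_getLastD, hp]
    have huL : uL ((x :: t) ++ [y])
        = incAt p (upF ((x :: t).reverse) + 1) y :: uL (x :: t) := by
      simp only [uL, hinc]
      simp
    -- w-lists
    have hw0 : incL ((x :: t).reverse) = 1 :: incFrom p 1 r' := by rw [hr]; rfl
    have hw1 : incL (((x :: t) ++ [y]).reverse)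
        = 1 :: incAt y 1 p :: incFrom p (incAt y 1 p) r' := by
      rw [hrevs]; rfl
    have hupnn : 0 ≤ upF ((x :: t).reverse) := by
      rw [hr]; simp only [upF]; exact dcnt_nonneg r' p
    have hkle : downF ((x :: t).reverse) ≤ r'.length := by
      rw [hr]; simp only [downF]; exact acnt_le_length r' p
    rcases lt_trichotomy p y with hcase | hcase | hcase
    · -- ascent: y > p
      have hia : incAt p (upF ((x :: t).reverse) + 1) y = upF ((x :: t).reverse) + 2 := by
        simp only [incAt]; rw [if_pos (by omega)]; ring
      have hib : incAt y 1 p = 1 := by simp only [incAt]; rw [if_neg (by omega)]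
      have hup : upF (((x :: t) ++ [y]).reverse) = upF ((x :: t).reverse) + 1 := by
        rw [hrevs, hr]; simp only [upF, dcnt]; rw [if_pos hcase]
      have hdn : downF (((x :: t) ++ [y]).reverse) = 0 := by
        rw [hrevs]; simp only [downF, acnt]; rw [if_neg (by omega)]
      have hSF : SF ((x :: t) ++ [y]) = SF (x :: t) + (upF ((x :: t).reverse) + 2) := by
        simp only [SF, huL, hw1, hia, hib, hw0, List.zipWith_cons_cons, List.sum_cons]
        have : max (upF ((x :: t).reverse) + 2) 1 = upF ((x :: t).reverse) + 2 := by omega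
        rw [this]; ring
      have hpk : pkF ((x :: t) ++ [y]) = upF ((x :: t).reverse) + 2 := by
        simp only [pkF, hdn, huL, hia, List.getD_cons_zero]
      simp only [stInv, candyStep, hlast, hup, hdn, hSF, hpk]
      rw [if_pos (by show y > (x :: t).getLastD 0; omega)]
      rw [Prod.mk.injEq, Prod.mk.injEq, Prod.mk.injEq, Prod.mk.injEq]
      refine ⟨rfl, rfl, by norm_num, by ring, by ring⟩
    · -- equal: y = p
      have hia : incAt p (upF ((x :: t).reverse) + 1) y = 1 := by
        simp only [incAt]; rw [if_neg (by omega)]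
      have hib : incAt y 1 p = 1 := by simp only [incAt]; rw [if_neg (by omega)]
      have hup : upF (((x :: t) ++ [y]).reverse) = 0 := by
        rw [hrevs]; simp only [upF, dcnt]; rw [if_neg (by omega)]
      have hdn : downF (((x :: t) ++ [y]).reverse) = 0 := by
        rw [hrevs]; simp only [downF, acnt]; rw [if_neg (by omega)]
      have hSF : SF ((x :: t) ++ [y]) = SF (x :: t) + 1 := by
        simp only [SF, huL, hw1, hia, hib, hw0, List.zipWith_cons_cons, List.sum_cons]
        have : max (1 : Int) 1 = 1 := by omega
        rw [this]; ring
      have hpk : pkF ((x :: t) ++ [y]) = 1 := by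
        simp only [pkF, hdn, huL, hia, List.getD_cons_zero]
      simp only [stInv, candyStep, hlast, hup, hdn, hSF, hpk]
      rw [if_neg (by show ¬ y > (x :: t).getLastD 0; omega),
          if_neg (by show ¬ y < (x :: t).getLastD 0; omega)]
      rw [Prod.mk.injEq, Prod.mk.injEq, Prod.mk.injEq, Prod.mk.injEq]
      refine ⟨rfl, rfl, by norm_num, by ring, by ring⟩
    · -- descent: y < p
      have hia : incAt p (upF ((x :: t).reverse) + 1) y = 1 := by
        simp only [incAt]; rw [if_neg (by omega)]
      have hib : incAt y 1 p = 1 + 1 := by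
        simp only [incAt]; rw [if_pos (by omega)]
      have hup : upF (((x :: t) ++ [y]).reverse) = 0 := by
        rw [hrevs]; simp only [upF, dcnt]; rw [if_neg (by omega)]
      have hkF : downF ((x :: t).reverse) = acnt p r' := by rw [hr]; rfl
      have hdn : downF (((x :: t) ++ [y]).reverse) = acnt p r' + 1 := by
        rw [hrevs]; simp only [downF, acnt]; rw [if_pos (by omega)]
      have hkle' : acnt p r' ≤ r'.length := by rw [← hkF]; exact hkle
      have hklt2 : acnt p r' < (uL (x :: t)).length := by rw [hlens]; omega
      have hdelta := delta_sum r' p 1 (uL (x :: t)) (by omega) hklt2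
        (by rw [hlens]; omega)
        (by intro j hj; exact uL_run_ones t x j (by rw [hkF]; omega))
      have hpkv : pkF (x :: t) = (uL (x :: t)).getD (acnt p r') 0 := by
        simp only [pkF, hkF]
      have hSF : SF ((x :: t) ++ [y]) = SF (x :: t) + 1 + acnt p r'
          + (if (acnt p r' : Int) + 2 > pkF (x :: t) then 1 else 0) := by
        simp only [SF, huL, hw1, hia, hib, hw0, List.zipWith_cons_cons, List.sum_cons]
        rw [hdelta, hpkv]
        have hmax : max (1 : Int) 1 = 1 := by omega
        rw [hmax]
        split_ifs <;> omega
      have hpk : pkF ((x :: t) ++ [y]) = pkF (x :: t) := by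
        simp only [pkF, hdn, huL, hia, hkF, List.getD_cons_succ]
      simp only [stInv, candyStep, hlast, hup, hdn, hSF, hpk, hkF]
      rw [if_neg (by show ¬ y > (x :: t).getLastD 0; omega),
          if_pos (by show y < (x :: t).getLastD 0; omega)]
      rw [Prod.mk.injEq, Prod.mk.injEq, Prod.mk.injEq, Prod.mk.injEq]
      refine ⟨rfl, rfl, by push_cast; ring, rfl, ?_⟩
      split_ifs <;> omega

theorem candy_fold (t : List Int) (x : Int) :
    t.foldl candyStep (x, 0, 0, 0, 1) = stInv (x :: t) := by
  induction t using List.reverseRecOn with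
  | nil =>
    simp only [List.foldl_nil, stInv, upF, downF, pkF, uL, SF, incL, incFrom]
    rfl
  | append_singleton t' y ih =>
    rw [List.foldl_append, ih, List.foldl_cons, List.foldl_nil,
        candyStep_stInv (x :: t') (by simp) y]
    rfl

theorem mList_eq_zipWith (s : List Int) :
    mList s = List.zipWith max (incL s) (decL s) := by
  simp [mList, List.zip]

theorem alt_eq_sum_mList (s : List Int) : minRewards_alt s = (mList s).sum := by
  cases s with
  | nil => rfl
  | cons x t =>
    simp only [minRewards_alt, candy_fold t x, stInv]
    rw [mList_eq_zipWith]
    have hlen : (incL (x :: t)).length = (decL (x :: t)).length := by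
      rw [length_incL, length_decL]
    rw [← List.sum_reverse, List.reverse_zipWith hlen]
    simp only [SF, uL, decL, List.reverse_reverse]

-- ===== VERDICT (by name: the statement is the Claim_ definition above) =====
theorem minRewards_spec : Claim_equal_minRewards := by
  intro scores _
  unfold Spec_minRewards
  rw [minRewards_eq_sum_mList, alt_eq_sum_mList]
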